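-- pv_equiv track=rewrite | github.com/SestrenExsis/CodeKatas | adventofcode2020/Solver.py | solve
-- ===== SOURCE A (Python) =====
-- import collections
--
-- def solve(initial_state):
--     curr_state = set(initial_state)
--     for _ in range(6):
--         neighbors = collections.defaultdict(int)
--         for x, y, z in curr_state:
--             for (dx, dy, dz) in (
--                 (-1, -1, -1),
--                 (-1, -1,  0),
--                 (-1, -1,  1),
--                 (-1,  0, -1),
--                 (-1,  0,  0),
--                 (-1,  0,  1),
--                 (-1,  1, -1),
--                 (-1,  1,  0),
--                 (-1,  1,  1),
--                 ( 0, -1, -1),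
--                 ( 0, -1,  0),
--                 ( 0, -1,  1),
--                 ( 0,  0, -1),
--                 # ( 0,  0,  0),
--                 ( 0,  0,  1),
--                 ( 0,  1, -1),
--                 ( 0,  1,  0),
--                 ( 0,  1,  1),
--                 ( 1, -1, -1),
--                 ( 1, -1,  0),
--                 ( 1, -1,  1),
--                 ( 1,  0, -1),
--                 ( 1,  0,  0),
--                 ( 1,  0,  1),
--                 ( 1,  1, -1),
--                 ( 1,  1,  0),
--                 ( 1,  1,  1),
--                 ):
--                 neighbors[(x + dx, y + dy, z + dz)] += 1
--         next_state = set()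
--         for x, y, z in curr_state:
--             if 2 <= neighbors[(x, y, z)] <= 3:
--                 next_state.add((x, y, z))
--         for x, y, z in neighbors:
--             if neighbors[(x, y, z)] == 3 and (x, y, z) not in curr_state:
--                 next_state.add((x, y, z))
--         curr_state = next_state
--     result = len(curr_state)
--     return result
-- ===== SOURCE B (Python) =====
-- OFFSETS = [
--     (dx, dy, dz)
--     for dx in (-1, 0, 1)
--     for dy in (-1, 0, 1)
--     for dz in (-1, 0, 1)
--     if (dx, dy, dz) != (0, 0, 0)
-- ]
--
--
-- def neighbors_of(cell):
--     x, y, z = cell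
--     return [(x + dx, y + dy, z + dz) for (dx, dy, dz) in OFFSETS]
--
--
-- def solve(initial_state):
--     live = set(initial_state)
--     for _ in range(6):
--         candidates = set(live)
--         for cell in live:
--             candidates.update(neighbors_of(cell))
--         live = {
--             c for c in candidates
--             if (count := len([n for n in neighbors_of(c) if n in live])) == 3
--             or (c in live and count == 2)
--         }
--     return len(live)
-- ===== Notes on version B (the rewrite author's own statement) =====
-- stated objective: simpler
-- what changed: Replaces A's scatter phase (a defaultdict accumulating +1 for each of the 26 neighbor offsets of every live cell, then two separate loops over the live set and the dict keys) with a candidate set (live cells plus all their neighbor offsets) and a single filtering pass that counts each candidate's live neighbors directly by membership tests.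
import Mathlib
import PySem

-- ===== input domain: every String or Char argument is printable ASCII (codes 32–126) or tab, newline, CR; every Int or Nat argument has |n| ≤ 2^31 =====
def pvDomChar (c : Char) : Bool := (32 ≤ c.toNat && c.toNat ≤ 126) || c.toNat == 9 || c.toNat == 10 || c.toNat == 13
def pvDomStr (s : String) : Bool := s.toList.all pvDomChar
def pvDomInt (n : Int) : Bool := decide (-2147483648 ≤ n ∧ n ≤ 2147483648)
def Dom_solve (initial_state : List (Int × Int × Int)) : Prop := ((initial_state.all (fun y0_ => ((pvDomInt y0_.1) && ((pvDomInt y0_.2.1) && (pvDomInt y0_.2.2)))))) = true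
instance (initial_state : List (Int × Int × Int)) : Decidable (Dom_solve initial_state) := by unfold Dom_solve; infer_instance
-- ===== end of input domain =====

-- B replaces A's scatter-and-count neighbor dictionary with a candidate set and a direct
-- per-candidate membership count (objective: simpler); return values proved equal.

-- The 26-offset literal both Python sources carry (A as an inline tuple, Source B as OFFSETS).
def pvOffsets : List (Int × Int × Int) :=
  [(-1, -1, -1), (-1, -1, 0), (-1, -1, 1),
   (-1,  0, -1), (-1,  0, 0), (-1,  0, 1),
   (-1,  1, -1), (-1,  1, 0), (-1,  1, 1),
   ( 0, -1, -1), ( 0, -1, 0), ( 0, -1, 1),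
   ( 0,  0, -1),              ( 0,  0, 1),
   ( 0,  1, -1), ( 0,  1, 0), ( 0,  1, 1),
   ( 1, -1, -1), ( 1, -1, 0), ( 1, -1, 1),
   ( 1,  0, -1), ( 1,  0, 0), ( 1,  0, 1),
   ( 1,  1, -1), ( 1,  1, 0), ( 1,  1, 1)]

-- ===== PORT A =====
-- neighbors = defaultdict(int); for (x,y,z) in curr_state: for d in offsets: neighbors[...] += 1
-- (The defaultdict read `neighbors[(x,y,z)]` in the survivor loop also INSERTS a 0 for missing
-- keys in Python; those 0-valued keys can never satisfy `== 3` in the birth loop, so the port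
-- reads with getD and drops that side effect — the returned value is identical.)
def pvNeighborCounts (s : List (Int × Int × Int)) : PySem.Dict (Int × Int × Int) Int :=
  s.foldl
    (fun d p =>
      pvOffsets.foldl (fun d o => d.modify (p.1 + o.1, p.2.1 + o.2.1, p.2.2 + o.2.2) 0 (· + 1)) d)
    PySem.Dict.empty

-- one cycle of A: survivors from curr_state, then births from the dict's keys
def pvStepA (s : PySem.Set (Int × Int × Int)) : PySem.Set (Int × Int × Int) :=
  let nb := pvNeighborCounts s
  let ns := s.foldl
    (fun t p => if 2 ≤ nb.getD p 0 ∧ nb.getD p 0 ≤ 3 then PySem.Set.add t p else t)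
    PySem.Set.empty
  nb.keys.foldl (fun t p => if nb.getD p 0 = 3 ∧ p ∉ s then PySem.Set.add t p else t) ns

def solve (initial_state : List (Int × Int × Int)) : Int :=
  (((List.range 6).foldl (fun s _ => pvStepA s) (PySem.Set.ofList initial_state)).length : Int)

-- ===== PORT B =====
def pvNeighborsOf (c : Int × Int × Int) : List (Int × Int × Int) :=
  pvOffsets.map (fun o => (c.1 + o.1, c.2.1 + o.2.1, c.2.2 + o.2.2))

-- count = len([n for n in neighbors_of(c) if n in live])
def pvLiveCount (live : PySem.Set (Int × Int × Int)) (c : Int × Int × Int) : Nat :=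
  ((pvNeighborsOf c).filter (fun n => decide (n ∈ live))).length

-- one cycle of B: candidates = live ∪ neighbors of live, then one filtering pass
def pvStepB (live : PySem.Set (Int × Int × Int)) : PySem.Set (Int × Int × Int) :=
  let cands := live.foldl (fun t p => PySem.Set.update t (pvNeighborsOf p)) (PySem.Set.ofList live)
  PySem.Set.ofList (cands.filter
    (fun c => pvLiveCount live c == 3 || (decide (c ∈ live) && pvLiveCount live c == 2)))

def solve_alt (initial_state : List (Int × Int × Int)) : Int :=
  (((List.range 6).foldl (fun t _ => pvStepB t) (PySem.Set.ofList initial_state)).length : Int)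

-- ===== PRECONDITION & SPEC =====
def Spec_solve (initial_state : List (Int × Int × Int)) (out : Int) : Prop := out = solve_alt initial_state
instance (initial_state : List (Int × Int × Int)) (out : Int) : Decidable (Spec_solve initial_state out) := by unfold Spec_solve; infer_instance

-- ===== CLAIM (what is proved, stated in full; the proofs are below) =====
def Claim_equal_solve : Prop := ∀ (initial_state : List (Int × Int × Int)), Dom_solve initial_state → Spec_solve initial_state (solve initial_state)

-- ===== LEMMAS AND PROOFS =====

-- shift q by o (the coordinate arithmetic both ports do inline)
def pvShift (q o : Int × Int × Int) : Int × Int × Int := (q.1 + o.1, q.2.1 + o.2.1, q.2.2 + o.2.2)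
def pvSub (q p : Int × Int × Int) : Int × Int × Int := (q.1 - p.1, q.2.1 - p.2.1, q.2.2 - p.2.2)
-- the number of live neighbors of q (the common characterisation both steps are reduced to)
def pvCnt (s : List (Int × Int × Int)) (q : Int × Int × Int) : Nat :=
  pvOffsets.countP (fun o => decide (pvShift q o ∈ s))
-- membership in the next generation
def pvM (s : List (Int × Int × Int)) (q : Int × Int × Int) : Prop :=
  pvCnt s q = 3 ∨ (q ∈ s ∧ pvCnt s q = 2)
-- all (p + o) for live p: the multiset A's dictionary counts
def pvFlat (s : List (Int × Int × Int)) : List (Int × Int × Int) :=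
  s.flatMap (fun p => pvOffsets.map (pvShift p))

theorem pvOffsets_nodup : pvOffsets.Nodup := by decide

theorem pvOffsets_neg : ∀ o ∈ pvOffsets, (-o.1, -o.2.1, -o.2.2) ∈ pvOffsets := by decide

theorem pvShift_sub (q p : Int × Int × Int) : pvShift p (pvSub q p) = q := by
  simp [pvShift, pvSub]

theorem pvSub_shift (p o : Int × Int × Int) : pvSub (pvShift p o) p = o := by
  simp [pvShift, pvSub]

theorem pvSub_neg (q p : Int × Int × Int) : pvSub q p = (-(pvSub p q).1, -(pvSub p q).2.1, -(pvSub p q).2.2) := by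
  simp [pvSub]

theorem pvShift_inj (q : Int × Int × Int) : Function.Injective (pvShift q) := by
  intro a b h
  simp [pvShift, Prod.ext_iff] at h ⊢
  omega

theorem pvNeighborsOf_eq (c : Int × Int × Int) : pvNeighborsOf c = pvOffsets.map (pvShift c) := rfl

-- A's dictionary is the count of pvFlat
theorem pvNeighborCounts_eq (s : List (Int × Int × Int)) :
    pvNeighborCounts s = (pvFlat s).foldl (fun d x => d.modify x 0 (· + 1)) PySem.Dict.empty := by
  unfold pvNeighborCounts pvFlat
  rw [List.foldl_flatMap]
  simp [List.foldl_map, pvShift]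

theorem pvGetD_eq_count (s : List (Int × Int × Int)) (q : Int × Int × Int) :
    (pvNeighborCounts s).getD q 0 = ((pvFlat s).count q : Int) := by
  rw [pvNeighborCounts_eq]
  rw [PySem.Dict.getD_foldl_modify_add_one]
  simp

theorem pvKeys_mem (s : List (Int × Int × Int)) (q : Int × Int × Int) :
    q ∈ (pvNeighborCounts s).keys ↔ q ∈ pvFlat s := by
  rw [pvNeighborCounts_eq, PySem.Dict.keys_foldl_modify, PySem.Dict.keys_empty,
    PySem.Set.update_nil_left, PySem.Set.mem_ofList]

theorem pvCount_flat (s : List (Int × Int × Int)) (q : Int × Int × Int) :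
    (pvFlat s).count q = s.countP (fun p => decide (pvSub q p ∈ pvOffsets)) := by
  induction s with
  | nil => simp [pvFlat]
  | cons p s ih =>
    have hper : ((pvOffsets.map (pvShift p)).count q) = (if pvSub q p ∈ pvOffsets then 1 else 0) := by
      by_cases h : pvSub q p ∈ pvOffsets
      · rw [if_pos h]
        have := List.count_map_of_injective pvOffsets (pvShift p) (pvShift_inj p) (pvSub q p)
        rw [pvShift_sub] at this
        rw [this, List.count_eq_one_of_mem pvOffsets_nodup h]
      · rw [if_neg h, List.count_eq_zero]
        intro hq
        rcases List.mem_map.mp hq with ⟨o, ho, rfl⟩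
        rw [pvSub_shift] at h
        exact h ho
    simp only [pvFlat, List.flatMap_cons, List.count_append, List.countP_cons]
    rw [← pvFlat, ih, hper]
    by_cases h : pvSub q p ∈ pvOffsets
    · simp [h]; omega
    · simp [h]

theorem pvCountP_swap (s : List (Int × Int × Int)) (hs : s.Nodup) (q : Int × Int × Int) :
    s.countP (fun p => decide (pvSub q p ∈ pvOffsets)) = pvCnt s q := by
  unfold pvCnt
  rw [List.countP_eq_length_filter, List.countP_eq_length_filter]
  have hperm :
      (s.filter (fun p => decide (pvSub q p ∈ pvOffsets))).Perm
        ((pvOffsets.filter (fun o => decide (pvShift q o ∈ s))).map (pvShift q)) := by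
    rw [List.perm_ext_iff_of_nodup (hs.filter _)
      (((pvOffsets_nodup.filter _)).map (pvShift_inj q))]
    intro z
    simp only [List.mem_filter, List.mem_map, decide_eq_true_eq]
    constructor
    · rintro ⟨hz, ho⟩
      refine ⟨pvSub z q, ⟨?_, ?_⟩, pvShift_sub z q⟩
      · have := pvOffsets_neg _ ho
        rwa [← pvSub_neg] at this
      · rw [pvShift_sub]; exact hz
    · rintro ⟨o, ⟨ho, hmem⟩, rfl⟩
      refine ⟨hmem, ?_⟩
      have h2 : pvSub q (pvShift q o) = (-o.1, -o.2.1, -o.2.2) := by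
        rw [pvSub_neg, pvSub_shift]
      rw [h2]; exact pvOffsets_neg _ ho
  rw [hperm.length_eq, List.length_map]

theorem pvGetD_eq_cnt (s : List (Int × Int × Int)) (hs : s.Nodup) (q : Int × Int × Int) :
    (pvNeighborCounts s).getD q 0 = (pvCnt s q : Int) := by
  rw [pvGetD_eq_count, pvCount_flat, pvCountP_swap s hs]

-- a positive count puts q among the dictionary's keys
theorem pvMem_flat_of_cnt_pos (s : List (Int × Int × Int)) (q : Int × Int × Int)
    (h : 0 < pvCnt s q) : q ∈ pvFlat s := by
  unfold pvCnt at h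
  rcases List.countP_pos_iff.mp h with ⟨o, ho, hq⟩
  rw [decide_eq_true_eq] at hq
  refine List.mem_flatMap.mpr ⟨pvShift q o, hq, ?_⟩
  refine List.mem_map.mpr ⟨(-o.1, -o.2.1, -o.2.2), pvOffsets_neg _ ho, ?_⟩
  simp [pvShift]

-- generic loop shapes of the two step functions
theorem pvMem_foldl_add_if {cond : Int × Int × Int → Prop} [DecidablePred cond]
    (l : List (Int × Int × Int)) (init : PySem.Set (Int × Int × Int)) (x : Int × Int × Int) :
    x ∈ l.foldl (fun t p => if cond p then PySem.Set.add t p else t) init ↔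
      x ∈ init ∨ (x ∈ l ∧ cond x) := by
  induction l generalizing init with
  | nil => simp
  | cons p l ih =>
    simp only [List.foldl_cons, ih, List.mem_cons]
    by_cases h : cond p
    · rw [if_pos h, PySem.Set.mem_add]
      constructor
      · rintro (⟨h1 | rfl⟩ | h2)
        · exact Or.inl h1
        · exact Or.inr ⟨Or.inl rfl, h⟩
        · exact Or.inr ⟨Or.inr h2.1, h2.2⟩
      · rintro (h1 | ⟨rfl | h2, hc⟩)
        · exact Or.inl (Or.inl h1)
        · exact Or.inl (Or.inr rfl)
        · exact Or.inr ⟨h2, hc⟩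
    · rw [if_neg h]
      constructor
      · rintro (h1 | h2)
        · exact Or.inl h1
        · exact Or.inr ⟨Or.inr h2.1, h2.2⟩
      · rintro (h1 | ⟨rfl | h2, hc⟩)
        · exact Or.inl h1
        · exact absurd hc h
        · exact Or.inr ⟨h2, hc⟩

theorem pvNodup_foldl_add_if {cond : Int × Int × Int → Prop} [DecidablePred cond]
    (l : List (Int × Int × Int)) (init : PySem.Set (Int × Int × Int)) (h : init.Nodup) :
    (l.foldl (fun t p => if cond p then PySem.Set.add t p else t) init).Nodup := by
  induction l generalizing init with
  | nil => exact h
  | cons p l ih =>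
    simp only [List.foldl_cons]
    by_cases hc : cond p
    · rw [if_pos hc]; exact ih _ (PySem.Set.nodup_add _ _ h)
    · rw [if_neg hc]; exact ih _ h

theorem pvMem_foldl_update (l : List (Int × Int × Int)) (init : PySem.Set (Int × Int × Int))
    (x : Int × Int × Int) :
    x ∈ l.foldl (fun t p => PySem.Set.update t (pvNeighborsOf p)) init ↔
      x ∈ init ∨ ∃ p ∈ l, x ∈ pvNeighborsOf p := by
  induction l generalizing init with
  | nil => simp
  | cons p l ih =>
    simp only [List.foldl_cons, ih, PySem.Set.mem_update, List.mem_cons]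
    constructor
    · rintro ((h | h) | ⟨r, hr, hx⟩)
      · exact Or.inl h
      · exact Or.inr ⟨p, Or.inl rfl, h⟩
      · exact Or.inr ⟨r, Or.inr hr, hx⟩
    · rintro (h | ⟨r, rfl | hr, hx⟩)
      · exact Or.inl (Or.inl h)
      · exact Or.inl (Or.inr hx)
      · exact Or.inr ⟨r, hr, hx⟩

-- membership characterisation of A's step
theorem pvStepA_mem (s : PySem.Set (Int × Int × Int)) (hs : s.Nodup) (x : Int × Int × Int) :
    x ∈ pvStepA s ↔ pvM s x := by
  unfold pvStepA pvM
  rw [pvMem_foldl_add_if, pvMem_foldl_add_if]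
  simp only [PySem.Set.empty, List.not_mem_nil, false_or]
  rw [pvGetD_eq_cnt s hs x]
  have hkeys := pvKeys_mem s x
  constructor
  · rintro (⟨hx, h2, h3⟩ | ⟨_, h3, hnx⟩)
    · have : pvCnt s x = 2 ∨ pvCnt s x = 3 := by omega
      rcases this with h | h
      · exact Or.inr ⟨hx, h⟩
      · exact Or.inl h
    · exact Or.inl (by omega)
  · rintro (h3 | ⟨hx, h2⟩)
    · by_cases hx : x ∈ s
      · exact Or.inl ⟨hx, by omega, by omega⟩
      · exact Or.inr ⟨hkeys.mpr (pvMem_flat_of_cnt_pos s x (by omega)), by omega, hx⟩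
    · exact Or.inl ⟨hx, by omega, by omega⟩

theorem pvStepA_nodup (s : PySem.Set (Int × Int × Int)) : (pvStepA s).Nodup := by
  unfold pvStepA
  exact pvNodup_foldl_add_if _ _ (pvNodup_foldl_add_if _ _ (by simp [PySem.Set.empty]))

-- B's count is pvCnt
theorem pvLiveCount_eq (t : PySem.Set (Int × Int × Int)) (c : Int × Int × Int) :
    pvLiveCount t c = pvCnt t c := by
  unfold pvLiveCount pvCnt
  rw [pvNeighborsOf_eq, ← List.countP_eq_length_filter, List.countP_map]
  rfl

-- membership characterisation of B's step
theorem pvStepB_mem (t : PySem.Set (Int × Int × Int)) (x : Int × Int × Int) :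
    x ∈ pvStepB t ↔ pvM t x := by
  unfold pvStepB pvM
  rw [PySem.Set.mem_ofList, List.mem_filter]
  simp only [pvLiveCount_eq, Bool.or_eq_true, Bool.and_eq_true, beq_iff_eq, decide_eq_true_eq]
  constructor
  · rintro ⟨_, h⟩; exact h
  · intro h
    refine ⟨(pvMem_foldl_update t (PySem.Set.ofList t) x).mpr ?_, h⟩
    rcases h with h3 | ⟨hx, _⟩
    · have hpos : 0 < pvCnt t x := by omega
      rcases List.countP_pos_iff.mp hpos with ⟨o, ho, hq⟩
      rw [decide_eq_true_eq] at hq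
      refine Or.inr ⟨pvShift x o, hq, ?_⟩
      rw [pvNeighborsOf_eq]
      refine List.mem_map.mpr ⟨(-o.1, -o.2.1, -o.2.2), pvOffsets_neg _ ho, ?_⟩
      simp [pvShift]
    · exact Or.inl ((PySem.Set.mem_ofList _ _).mpr hx)

theorem pvStepB_nodup (t : PySem.Set (Int × Int × Int)) : (pvStepB t).Nodup :=
  PySem.Set.nodup_ofList _

-- pvCnt only depends on membership
theorem pvCnt_congr (s t : List (Int × Int × Int)) (h : ∀ z, z ∈ s ↔ z ∈ t)
    (q : Int × Int × Int) : pvCnt s q = pvCnt t q := by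
  unfold pvCnt
  exact List.countP_congr (fun o _ => by simp [h])

-- the invariant carried through the six cycles
theorem pvIter (l : List Nat) (s t : PySem.Set (Int × Int × Int))
    (h1 : s.Nodup) (h2 : t.Nodup) (h3 : ∀ z, z ∈ s ↔ z ∈ t) :
    (l.foldl (fun s _ => pvStepA s) s).Nodup ∧
    (l.foldl (fun t _ => pvStepB t) t).Nodup ∧
    (∀ z, z ∈ l.foldl (fun s _ => pvStepA s) s ↔ z ∈ l.foldl (fun t _ => pvStepB t) t) := by
  induction l generalizing s t with
  | nil => exact ⟨h1, h2, h3⟩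
  | cons n l ih =>
    simp only [List.foldl_cons]
    refine ih (pvStepA s) (pvStepB t) (pvStepA_nodup s) (pvStepB_nodup t) ?_
    intro z
    rw [pvStepA_mem s h1 z, pvStepB_mem t z]
    unfold pvM
    rw [pvCnt_congr s t h3 z, h3 z]

-- ===== VERDICT (by name: the statement is the Claim_ definition above) =====
theorem solve_spec : Claim_equal_solve := by
  intro initial_state _
  unfold Spec_solve solve solve_alt
  obtain ⟨hA, hB, hmem⟩ := pvIter (List.range 6) (PySem.Set.ofList initial_state)
    (PySem.Set.ofList initial_state) (PySem.Set.nodup_ofList _) (PySem.Set.nodup_ofList _)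
    (fun _ => Iff.rfl)
  have hperm := (List.perm_ext_iff_of_nodup hA hB).mpr hmem
  rw [hperm.length_eq]
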